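-- pv_equiv track=rewrite | github.com/AtonixCorp/Ledgrionyx | api/equity/services.py | _split_units
-- ===== SOURCE A (Python) =====
-- def _split_units(total_units: int, periods: int) -> list[int]:
--     if periods <= 0:
--         return []
--     base_units = total_units // periods
--     remainder = total_units % periods
--     schedule = [base_units for _ in range(periods)]
--     for index in range(remainder):
--         schedule[-(index + 1)] += 1
--     return schedule
-- ===== SOURCE B (Python) =====
-- def _split_units(total_units: int, periods: int) -> list[int]:
--     if periods <= 0:
--         return []
--     schedule = []
--     remaining = total_units
--     for slots_left in range(periods, 0, -1):
--         share = -(-remaining // slots_left)  # ceiling of the fair share of what is left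
--         schedule.append(share)
--         remaining -= share
--     schedule.reverse()
--     return schedule
-- ===== Notes on version B (the rewrite author's own statement) =====
-- stated objective: alternative
-- what changed: Replaces the divmod build-then-patch scheme (flat list of base shares, then a negative-index loop adding 1 to the last remainder slots) with a single back-to-front greedy pass: each slot takes the ceiling of remaining/slots_left of the still-undistributed total, no quotient/remainder pair is ever computed.
import Mathlib
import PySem

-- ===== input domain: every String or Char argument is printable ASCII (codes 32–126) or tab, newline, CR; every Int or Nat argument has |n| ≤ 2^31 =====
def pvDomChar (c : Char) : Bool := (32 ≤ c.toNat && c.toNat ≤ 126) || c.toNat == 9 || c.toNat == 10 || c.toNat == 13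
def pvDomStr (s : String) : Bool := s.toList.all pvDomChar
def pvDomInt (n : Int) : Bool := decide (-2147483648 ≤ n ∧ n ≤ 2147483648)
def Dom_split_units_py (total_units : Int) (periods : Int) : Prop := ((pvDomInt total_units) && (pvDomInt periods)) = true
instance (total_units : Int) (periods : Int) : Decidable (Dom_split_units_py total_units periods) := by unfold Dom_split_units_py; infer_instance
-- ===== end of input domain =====

-- B distributes greedily back-to-front: each slot takes the ceiling of remaining/slots_left,
-- instead of A's divmod build-then-patch scheme; objective: alternative algorithm, same cost.

-- ===== PORT A =====
-- literal transliteration of _split_units: comprehension over range(periods), then a loop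
-- over range(remainder) doing 'schedule[-(index+1)] += 1' (negative-index get + set via PySem).
def split_units_py (total_units : Int) (periods : Int) : List Int :=
  if periods ≤ 0 then []
  else
    let base_units := PySem.Int.floordiv total_units periods
    let remainder := PySem.Int.mod total_units periods
    let schedule := (PySem.List.pyRange 0 periods 1).map (fun _ => base_units)
    (PySem.List.pyRange 0 remainder 1).foldl
      (fun s index =>
        PySem.List.pySetD s (-(index + 1)) (PySem.List.pyGetD s (-(index + 1)) 0 + 1)) schedule

-- ===== PORT B =====
-- literal transliteration of Source B: loop over range(periods, 0, -1) carrying (schedule, remaining),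
-- share = -(-remaining // slots_left) (ceiling division), append, subtract; reverse at the end.
def split_units_py_alt (total_units : Int) (periods : Int) : List Int :=
  if periods ≤ 0 then []
  else
    let st := (PySem.List.pyRange periods 0 (-1)).foldl
      (fun (st : List Int × Int) slots_left =>
        let share := -(PySem.Int.floordiv (-st.2) slots_left)
        (st.1 ++ [share], st.2 - share)) ([], total_units)
    st.1.reverse

-- ===== PRECONDITION & SPEC =====
def Spec_split_units_py (total_units : Int) (periods : Int) (out : List Int) : Prop := out = split_units_py_alt total_units periods
instance (total_units : Int) (periods : Int) (out : List Int) : Decidable (Spec_split_units_py total_units periods out) := by unfold Spec_split_units_py; infer_instance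

-- ===== CLAIM (what is proved, stated in full; the proofs are below) =====
def Claim_equal_split_units_py : Prop := ∀ (total_units : Int) (periods : Int), Dom_split_units_py total_units periods → Spec_split_units_py total_units periods (split_units_py total_units periods)

-- ===== LEMMAS AND PROOFS =====

-- The common target value: D base slots of q followed by E slots of q+1.
def pvSeg (q : Int) (D E : Nat) : List Int :=
  List.replicate D q ++ List.replicate E (q + 1)

-- ---- A-side: the build-then-patch loops produce pvSeg ----

-- the body of A's patch loop at a cast index k with k+1 ≤ length: one in-range negative-index step
theorem pv_step_eq (s : List Int) (k : Nat) (hk : k + 1 ≤ s.length) :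
    PySem.List.pySetD s (-((k : Int) + 1)) (PySem.List.pyGetD s (-((k : Int) + 1)) 0 + 1)
      = s.set (s.length - (k + 1)) (s.getD (s.length - (k + 1)) 0 + 1) := by
  have h1 : PySem.List.pyIdx? s.length (-((k : Int) + 1)) = some (s.length - (k + 1)) := by
    rw [PySem.List.pyIdx?, if_neg (by omega : ¬ (0 : Int) ≤ -((k : Int) + 1)),
      if_pos (by omega : -(s.length : Int) ≤ -((k : Int) + 1))]
    congr 1
  simp only [PySem.List.pySetD, PySem.List.pySet?, PySem.List.pyGetD, PySem.List.pyGet?, h1,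
    Option.map_some, Option.getD_some, List.getD_eq_getElem?_getD]
  rfl

-- setting the element right after a replicate prefix
theorem pv_set_replicate (n : Nat) (b v : Int) (ys : List Int) :
    (List.replicate n b ++ b :: ys).set n v = List.replicate n b ++ v :: ys := by
  induction n with
  | zero => rfl
  | succ n ih => simp [List.replicate_succ, ih]

-- A's patch loop on a replicate: after R increments at positions len-1, …, len-R,
-- the list is the two homogeneous segments.
theorem pv_loop (b : Int) (P : Nat) :
    ∀ (R : Nat), R ≤ P →
      (List.range R).foldl
          (fun (s : List Int) (k : Nat) =>
            PySem.List.pySetD s (-((k : Int) + 1)) (PySem.List.pyGetD s (-((k : Int) + 1)) 0 + 1))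
          (List.replicate P b)
        = List.replicate (P - R) b ++ List.replicate R (b + 1) := by
  intro R
  induction R with
  | zero => simp
  | succ R ih =>
    intro hR
    rw [List.range_succ, List.foldl_append, ih (by omega)]
    have hlen : (List.replicate (P - R) b ++ List.replicate R (b + 1)).length = P := by
      simp; omega
    rw [List.foldl_cons, List.foldl_nil,
      pv_step_eq _ R (by rw [hlen]; omega), hlen]
    have hsplit : List.replicate (P - R) b ++ List.replicate R (b + 1)
        = List.replicate (P - (R + 1)) b ++ b :: List.replicate R (b + 1) := by
      rw [show P - R = (P - (R + 1)) + 1 by omega, List.replicate_succ', List.append_assoc]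
      rfl
    have hgd : (List.replicate (P - R) b ++ List.replicate R (b + 1)).getD (P - (R + 1)) 0 = b := by
      rw [hsplit, List.getD_eq_getElem?_getD,
        List.getElem?_append_right (by simp)]
      simp
    rw [hgd, hsplit, pv_set_replicate, ← List.replicate_succ]

theorem pv_A_eq_seg (t p : Int) (hp : 0 < p) :
    split_units_py t p
      = pvSeg (PySem.Int.floordiv t p) (p - PySem.Int.mod t p).toNat (PySem.Int.mod t p).toNat := by
  unfold split_units_py pvSeg
  have hple : ¬ p ≤ 0 := by omega
  simp only [if_neg hple]
  set b := PySem.Int.floordiv t p with hb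
  have hme : PySem.Int.mod t p = t % p := PySem.Int.mod_eq_emod_of_pos hp
  have hr0 : 0 ≤ PySem.Int.mod t p := by rw [hme]; exact Int.emod_nonneg t (by omega)
  have hrp : PySem.Int.mod t p < p := by rw [hme]; exact Int.emod_lt_of_pos t hp
  set r := PySem.Int.mod t p with hrdef
  obtain ⟨R, hR⟩ : ∃ R : Nat, r = (R : Int) := ⟨r.toNat, by omega⟩
  obtain ⟨P, hP⟩ : ∃ P : Nat, p = (P : Int) := ⟨p.toNat, by omega⟩
  have hRP : R ≤ P := by omega
  have hsched : (PySem.List.pyRange 0 p 1).map (fun _ => b) = List.replicate P b := by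
    rw [hP, PySem.List.pyRange_zero_natCast, List.map_map]
    simp [List.eq_replicate_iff]
  rw [hsched, hR, PySem.List.pyRange_zero_natCast, List.foldl_map, pv_loop b P R hRP,
    show (p - (R : Int)).toNat = P - R by omega, show ((R : Int)).toNat = R by omega]

-- ---- B-side: the greedy ceiling pass produces pvSeg, read back-to-front ----

-- one greedy step: with remaining = q*m + e, 0 ≤ e < m, the ceiling share is q (e = 0) or q+1
theorem pv_ceil_share (q e m : Int) (hm : 0 < m) (he0 : 0 ≤ e) (hem : e < m) :
    -(PySem.Int.floordiv (-(q * m + e)) m) = q + (if e = 0 then 0 else 1) := by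
  rw [PySem.Int.neg_floordiv_neg_eq_iff_of_pos hm]
  split_ifs with h
  · subst h; constructor <;> nlinarith
  · have h1 : 0 < e := he0.lt_of_ne (Ne.symm h)
    constructor <;> nlinarith

-- what B's loop still has to hand out after the last E' + (extra slots) produced: the sum of
-- the first m target entries, written closed-form as q*m + max 0 (m - D)
def pvRem (q : Int) (D : Nat) (m : Nat) : Int :=
  q * m + max 0 ((m : Int) - D)

-- B's countdown fold, run from m slots, appends the first m entries of pvSeg in reverse order
theorem pv_alt_loop (q : Int) (D E : Nat) (hD : 1 ≤ D) :
    ∀ (m : Nat), m ≤ D + E → ∀ (acc : List Int),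
      (PySem.List.pyRange (m : Int) 0 (-1)).foldl
          (fun (st : List Int × Int) slots_left =>
            let share := -(PySem.Int.floordiv (-st.2) slots_left)
            (st.1 ++ [share], st.2 - share)) (acc, pvRem q D m)
        = (acc ++ ((pvSeg q D E).take m).reverse, 0) := by
  intro m
  induction m with
  | zero =>
    intro _ acc
    rw [PySem.List.pyRange_neg_one_eq_nil (by omega)]
    simp [pvRem]
  | succ m ih =>
    intro hm acc
    rw [PySem.List.pyRange_neg_one_cons (by exact_mod_cast Nat.succ_pos m), List.foldl_cons]
    have hms : ((m + 1 : Nat) : Int) - 1 = ((m : Nat) : Int) := by push_cast; ring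
    have hem : max 0 (((m+1 : Nat) : Int) - D) < ((m+1 : Nat) : Int) := by
      have h1 : (1:Int) ≤ D := by exact_mod_cast hD
      by_cases hc : ((m+1 : Nat) : Int) - D ≤ 0
      · rw [max_eq_left hc]; push_cast; omega
      · rw [max_eq_right (by omega)]; push_cast at hc ⊢; omega
    have hshare : -(PySem.Int.floordiv (-(pvRem q D (m+1))) ((m+1 : Nat) : Int))
        = q + (if max 0 (((m+1 : Nat) : Int) - D) = 0 then 0 else 1) := by
      unfold pvRem
      exact pv_ceil_share q _ _ (by exact_mod_cast Nat.succ_pos m) (le_max_left _ _) hem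
    have hml : m < (pvSeg q D E).length := by unfold pvSeg; simp; omega
    have hentry : (q + (if max 0 (((m+1 : Nat) : Int) - D) = 0 then 0 else 1))
        = (pvSeg q D E).getD m 0 := by
      by_cases hmd : m < D
      · rw [if_pos (max_eq_left (by push_cast; omega) :
            max 0 (((m+1 : Nat) : Int) - (D : Int)) = 0)]
        unfold pvSeg
        rw [List.getD_eq_getElem?_getD,
          List.getElem?_append_left (by simpa using hmd)]
        simp [hmd]
      · rw [max_eq_right (by push_cast; omega : (0:Int) ≤ ((m+1 : Nat) : Int) - D),
          if_neg (by push_cast; omega : ¬ ((m+1 : Nat) : Int) - (D : Int) = 0)]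
        unfold pvSeg
        rw [List.getD_eq_getElem?_getD,
          List.getElem?_append_right (by simpa using Nat.le_of_not_lt hmd)]
        have hme : m - D < E := by omega
        simp [hme]
    have hrem : pvRem q D (m+1) - (q + (if max 0 (((m+1 : Nat) : Int) - D) = 0 then 0 else 1))
        = pvRem q D m := by
      unfold pvRem
      by_cases hc : ((m+1 : Nat) : Int) ≤ (D : Int)
      · rw [max_eq_left (by push_cast at hc ⊢; omega), if_pos rfl,
          max_eq_left (by push_cast at hc ⊢; omega)]
        push_cast; ring
      · rw [max_eq_right (by push_cast at hc ⊢; omega), if_neg (by push_cast at hc ⊢; omega),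
          max_eq_right (by push_cast at hc ⊢; omega)]
        push_cast; ring
    have htake : ((pvSeg q D E).take (m+1)).reverse
        = (pvSeg q D E).getD m 0 :: ((pvSeg q D E).take m).reverse := by
      rw [List.take_add_one, List.getElem?_eq_getElem hml]
      simp [List.getD_eq_getElem?_getD, List.getElem?_eq_getElem hml]
    have hs : -(PySem.Int.floordiv (-(pvRem q D (m+1))) ((m+1 : Nat) : Int))
        = (pvSeg q D E).getD m 0 := hshare.trans hentry
    have hrem' : pvRem q D (m+1) - (pvSeg q D E).getD m 0 = pvRem q D m := hentry ▸ hrem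
    simp only [hs, hms, hrem']
    rw [ih (by omega) (acc ++ [(pvSeg q D E).getD m 0]), htake]
    simp

theorem pv_B_eq_seg (t p : Int) (hp : 0 < p) :
    split_units_py_alt t p
      = pvSeg (PySem.Int.floordiv t p) (p - PySem.Int.mod t p).toNat (PySem.Int.mod t p).toNat := by
  unfold split_units_py_alt
  rw [if_neg (by omega)]
  set q := PySem.Int.floordiv t p with hq
  have hme : PySem.Int.mod t p = t % p := PySem.Int.mod_eq_emod_of_pos hp
  have hr0 : 0 ≤ PySem.Int.mod t p := by rw [hme]; exact Int.emod_nonneg t (by omega)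
  have hrp : PySem.Int.mod t p < p := by rw [hme]; exact Int.emod_lt_of_pos t hp
  set r := PySem.Int.mod t p with hrdef
  have hqr : q * p + r = t := PySem.Int.floordiv_mul_add_mod t p
  set D := (p - r).toNat with hD
  set E := r.toNat with hE
  have hD1 : 1 ≤ D := by omega
  have hpDE : p = ((D + E : Nat) : Int) := by push_cast; omega
  have hinit : t = pvRem q D (D + E) := by
    unfold pvRem
    rw [max_eq_right (by push_cast; omega : (0:Int) ≤ ((D + E : Nat) : Int) - D),
      ← hpDE]
    have hDr : ((D : Nat) : Int) = p - r := by omega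
    rw [hDr]
    linarith [hqr]
  rw [hpDE, hinit, pv_alt_loop q D E hD1 (D + E) le_rfl []]
  have htk : (pvSeg q D E).take (D + E) = pvSeg q D E :=
    List.take_of_length_le (by simp [pvSeg])
  rw [htk]
  simp

-- ===== VERDICT (by name: the statement is the Claim_ definition above) =====
theorem split_units_py_spec : Claim_equal_split_units_py := by
  intro t p _
  unfold Spec_split_units_py
  by_cases hp : p ≤ 0
  · unfold split_units_py split_units_py_alt
    simp [hp]
  · rw [pv_A_eq_seg t p (by omega), pv_B_eq_seg t p (by omega)]
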